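-- pv_equiv track=rewrite | github.com/GoogleCloudPlatform/document-ai-samples | tax-processing-pipeline-python/tax_pipeline.py | get_personal_info
-- ===== SOURCE A (Python) =====
-- from typing import Dict, List, Tuple
--
-- def get_personal_info(forms: List[Dict]) -> Tuple[str, str, str]:
--     """
--     Extract Name, SSN, and address from forms.
--     Checks each form to see if it has the information.
--     """
--     # pylint: disable=line-too-long
--
--     full_name, ssn, address = "", "", ""
--
--     for form in forms:
--         if full_name and ssn and address:
--             break
--         if not form:
--             continue
--         if not full_name:
--             full_name = form.get("EmployeeName", "") or form.get("RecipientName", "")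
--         if not ssn:
--             ssn = form.get("SSN", "") or form.get("RecipientTIN", "")
--         if not address:
--             # Get Address as a single string
--             address = (
--                 form.get("EmployeeAddress", "")
--                 or form.get("RecipientAddress", "")
--                 or f'{form.get("RecipientAddressLine1", "")} {form.get("RecipientAddressLine2", "")}'
--                 or f'{form.get("RecipientStreetAddress", "")} {form.get("RecipientCityStateCountry", "")}'
--             )
--
--     return full_name, ssn, address
-- ===== SOURCE B (Python) =====
-- from typing import Dict, List, Tuple
--
-- def get_personal_info(forms: List[Dict]) -> Tuple[str, str, str]:
--     """Extract Name, SSN, and address from forms: one independent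
--     first-truthy scan per field instead of one interleaved pass."""
--     # pylint: disable=line-too-long
--
--     def first_truthy(extract):
--         for form in forms:
--             if not form:
--                 continue
--             value = extract(form)
--             if value:
--                 return value
--         return ""
--
--     full_name = first_truthy(
--         lambda f: f.get("EmployeeName", "") or f.get("RecipientName", "")
--     )
--     ssn = first_truthy(
--         lambda f: f.get("SSN", "") or f.get("RecipientTIN", "")
--     )
--     address = first_truthy(
--         lambda f: f.get("EmployeeAddress", "")
--         or f.get("RecipientAddress", "")
--         or f'{f.get("RecipientAddressLine1", "")} {f.get("RecipientAddressLine2", "")}'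
--         or f'{f.get("RecipientStreetAddress", "")} {f.get("RecipientCityStateCountry", "")}'
--     )
--     return full_name, ssn, address
-- ===== Notes on version B (the rewrite author's own statement) =====
-- stated objective: simpler
-- what changed: Replaces the single interleaved early-exit loop over three pieces of mutable state with a reusable first-truthy scan helper applied independently once per field.
import Mathlib
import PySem

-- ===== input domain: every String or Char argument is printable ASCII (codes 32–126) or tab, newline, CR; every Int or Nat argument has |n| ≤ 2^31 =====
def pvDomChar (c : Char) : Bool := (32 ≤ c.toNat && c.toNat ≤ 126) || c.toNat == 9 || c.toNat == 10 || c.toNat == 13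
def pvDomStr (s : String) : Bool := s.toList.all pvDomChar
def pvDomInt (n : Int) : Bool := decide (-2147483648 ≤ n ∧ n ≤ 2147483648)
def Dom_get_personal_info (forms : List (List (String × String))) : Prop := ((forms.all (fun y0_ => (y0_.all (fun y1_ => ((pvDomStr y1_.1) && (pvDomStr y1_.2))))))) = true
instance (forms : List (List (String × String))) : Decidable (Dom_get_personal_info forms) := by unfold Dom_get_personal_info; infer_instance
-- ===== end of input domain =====

-- B replaces A's single interleaved early-exit loop with one independent first-truthy scan per field (objective: simpler).


-- ===== PORT A =====
-- form.get(k, "") on the association list (first match, like a Python dict)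
def pvGet (form : List (String × String)) (k : String) : String :=
  PySem.Dict.getD ⟨form⟩ k ""

-- Python 'a or b' on strings
def pvOr (a b : String) : String := if a = "" then b else a

-- the three field expressions of the Python source, verbatim
def pvNameExpr (f : List (String × String)) : String :=
  pvOr (pvGet f "EmployeeName") (pvGet f "RecipientName")

def pvSsnExpr (f : List (String × String)) : String :=
  pvOr (pvGet f "SSN") (pvGet f "RecipientTIN")

def pvAddrExpr (f : List (String × String)) : String :=
  pvOr (pvGet f "EmployeeAddress")
    (pvOr (pvGet f "RecipientAddress")
      (pvOr (PySem.Str.join " " [pvGet f "RecipientAddressLine1", pvGet f "RecipientAddressLine2"])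
            (PySem.Str.join " " [pvGet f "RecipientStreetAddress", pvGet f "RecipientCityStateCountry"])))

-- A's loop: three mutable fields, early break when all set, skip falsy forms
def pvLoopA : List (List (String × String)) → String → String → String → String × String × String
  | [], n, s, a => (n, s, a)
  | f :: rest, n, s, a =>
    if n ≠ "" ∧ s ≠ "" ∧ a ≠ "" then (n, s, a)
    else if f = [] then pvLoopA rest n s a
    else pvLoopA rest (if n = "" then pvNameExpr f else n)
                      (if s = "" then pvSsnExpr f else s)
                      (if a = "" then pvAddrExpr f else a)

def get_personal_info (forms : List (List (String × String))) : String × String × String :=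
  pvLoopA forms "" "" ""

-- ===== PORT B =====
-- Source B's first_truthy: first truthy extracted value over non-falsy forms, else ""
def pvFirstTruthy (forms : List (List (String × String))) (ex : List (String × String) → String) : String :=
  match forms with
  | [] => ""
  | f :: rest =>
    if f = [] then pvFirstTruthy rest ex
    else
      let v := ex f
      if v = "" then pvFirstTruthy rest ex else v

def get_personal_info_alt (forms : List (List (String × String))) : String × String × String :=
  (pvFirstTruthy forms pvNameExpr, pvFirstTruthy forms pvSsnExpr, pvFirstTruthy forms pvAddrExpr)

-- ===== PRECONDITION & SPEC =====
def Spec_get_personal_info (forms : List (List (String × String))) (out : String × String × String) : Prop := out = get_personal_info_alt forms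
instance (forms : List (List (String × String))) (out : String × String × String) : Decidable (Spec_get_personal_info forms out) := by unfold Spec_get_personal_info; infer_instance

-- ===== CLAIM (what is proved, stated in full; the proofs are below) =====
def Claim_equal_get_personal_info : Prop := ∀ (forms : List (List (String × String))), Dom_get_personal_info forms → Spec_get_personal_info forms (get_personal_info forms)

-- ===== LEMMAS AND PROOFS =====

-- already-found fields pass through the loop; empty fields get the first-truthy value
def pvFill (x v : String) : String := if x = "" then v else x

theorem pvLoopA_eq_fill (forms : List (List (String × String))) :
    ∀ n s a, pvLoopA forms n s a =
      (pvFill n (pvFirstTruthy forms pvNameExpr),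
       pvFill s (pvFirstTruthy forms pvSsnExpr),
       pvFill a (pvFirstTruthy forms pvAddrExpr)) := by
  induction forms with
  | nil => intro n s a; simp [pvLoopA, pvFirstTruthy, pvFill]
  | cons f rest ih =>
    intro n s a
    by_cases hbrk : n ≠ "" ∧ s ≠ "" ∧ a ≠ ""
    · obtain ⟨hn, hs, ha⟩ := hbrk
      simp [pvLoopA, hn, hs, ha, pvFill]
    · by_cases hf : f = []
      · simp [pvLoopA, hbrk, hf, pvFirstTruthy, ih]
      · simp only [pvLoopA, if_neg hbrk, if_neg hf, ih]
        refine Prod.ext ?_ (Prod.ext ?_ ?_) <;> simp only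
        · by_cases hn : n = "" <;>
            simp only [hn, if_pos, if_neg, pvFill, pvFirstTruthy, if_neg hf] <;>
            by_cases hv : pvNameExpr f = "" <;> simp [pvFill, hv, hn]
        · by_cases hs : s = "" <;>
            simp only [hs, pvFill, pvFirstTruthy, if_neg hf] <;>
            by_cases hv : pvSsnExpr f = "" <;> simp [pvFill, hv, hs]
        · by_cases ha : a = "" <;>
            simp only [ha, pvFill, pvFirstTruthy, if_neg hf] <;>
            by_cases hv : pvAddrExpr f = "" <;> simp [pvFill, hv, ha]

-- ===== VERDICT (by name: the statement is the Claim_ definition above) =====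
theorem get_personal_info_spec : Claim_equal_get_personal_info := by
  intro forms _
  show get_personal_info forms = get_personal_info_alt forms
  simp [get_personal_info, get_personal_info_alt, pvLoopA_eq_fill, pvFill]
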